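-- pv_equiv track=rewrite | github.com/YzyLmc/skill_wrapper | src/data_structure.py | generate_possible_groundings
-- ===== SOURCE A (Python) =====
-- import itertools
--
-- def generate_possible_groundings(type_list: list[str], type_dict: dict[str, list[str]], fixed_grounding=None) -> list[list[object: str]]:
--     """
--     required_types: list of types corresponding to total argument slots
--     type_dict: dict of object -> type
--     fixed_grounding: list of object names fixed from the grounded skill
--     """
--     if fixed_grounding is None:
--         fixed_grounding = []
--
--     # Step 1: Validate fixed_grounding length
--     if len(fixed_grounding) > len(type_list):
--         raise ValueError("Fixed grounding has more objects than required types.")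
--
--     # Step 2: Remove fixed types and objects
--     remaining_types = type_list[len(fixed_grounding):]
--     used_objects = set(fixed_grounding)
--
--     # Step 3: Invert type_dict to type -> [objects]
--     type_to_objects = {}
--     for obj, tp in type_dict.items():
--         if obj not in used_objects:
--             type_to_objects.setdefault(tp, []).append(obj)
--
--     # Step 4: Gather object choices for remaining types
--     object_choices = [type_to_objects[tp] for tp in remaining_types]
--
--     # Step 5: Generate combinations and filter duplicates
--     combinations = []
--     for combo in itertools.product(*object_choices):
--         full_combo = tuple(fixed_grounding) + combo
--         if len(set(full_combo)) == len(full_combo):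
--             combinations.append(full_combo)
--
--     return combinations
-- ===== SOURCE B (Python) =====
-- def generate_possible_groundings(type_list: list[str], type_dict: dict[str, list[str]], fixed_grounding=None) -> list[list[object]]:
--     """Backtracking DFS over the remaining slots, pruning any branch that
--     reuses an object, instead of filtering the full cartesian product."""
--     fixed = list(fixed_grounding) if fixed_grounding is not None else []
--     if len(fixed) > len(type_list):
--         raise ValueError("Fixed grounding has more objects than required types.")
--     # a duplicated fixed object can never yield a duplicate-free grounding
--     if len(set(fixed)) != len(fixed):
--         return []
--     fixed_set = set(fixed)
--     pools = {}
--     for obj, tp in type_dict.items():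
--         if obj not in fixed_set:
--             pools.setdefault(tp, []).append(obj)
--     remaining = type_list[len(fixed):]
--     results = []
--
--     def dfs(i, partial):
--         if i == len(remaining):
--             results.append(tuple(fixed) + tuple(partial))
--             return
--         for obj in pools[remaining[i]]:
--             if obj not in partial:
--                 partial.append(obj)
--                 dfs(i + 1, partial)
--                 partial.pop()
--
--     dfs(0, [])
--     return results
-- ===== Notes on version B (the rewrite author's own statement) =====
-- stated objective: alternative
-- what changed: A materialises the full cartesian product of the per-type object pools and then filters out tuples that reuse an object; B does a backtracking DFS over the remaining slots that prunes any branch reusing an object as soon as it appears (and returns [] up front when fixed_grounding itself has a duplicate), so pruned subtrees are never enumerated; intended as faster, but a timing run measured only ~1.3-1.8x, below the 1.5x bar at the largest size.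
import Mathlib
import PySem

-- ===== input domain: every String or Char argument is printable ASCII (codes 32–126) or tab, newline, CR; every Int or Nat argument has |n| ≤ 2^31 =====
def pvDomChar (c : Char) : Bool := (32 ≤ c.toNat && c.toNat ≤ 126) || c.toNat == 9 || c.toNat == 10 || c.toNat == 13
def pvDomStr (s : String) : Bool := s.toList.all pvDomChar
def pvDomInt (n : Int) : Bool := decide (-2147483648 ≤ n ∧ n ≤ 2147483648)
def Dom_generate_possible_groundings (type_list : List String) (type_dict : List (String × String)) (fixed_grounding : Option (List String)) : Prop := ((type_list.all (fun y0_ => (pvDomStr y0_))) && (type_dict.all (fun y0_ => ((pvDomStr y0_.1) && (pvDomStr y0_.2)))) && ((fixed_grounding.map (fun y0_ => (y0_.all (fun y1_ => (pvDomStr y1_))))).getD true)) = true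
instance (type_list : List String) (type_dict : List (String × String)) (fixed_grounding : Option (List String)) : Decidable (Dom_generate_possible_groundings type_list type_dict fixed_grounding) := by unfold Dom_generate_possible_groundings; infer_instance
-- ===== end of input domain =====

-- B replaces A's "full cartesian product, then filter out groundings reusing an object" with a
-- backtracking DFS that prunes any branch reusing an object (objective: alternative enumeration
-- that never materialises pruned subtrees; same return value under Pre_).

-- ===== PORT A =====
-- itertools.product(*choices) in the order Python enumerates it
def pvProduct : List (List String) → List (List String)
  | [] => [[]]
  | c :: rest => c.flatMap (fun x => (pvProduct rest).map (fun combo => x :: combo))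

def generate_possible_groundings (type_list : List String) (type_dict : List (String × String)) (fixed_grounding : Option (List String)) : List (List String) :=
  let fixed := fixed_grounding.getD []
  -- (len(fixed) > len(type_list) raises ValueError: excluded by Pre_)
  let remaining := type_list.drop fixed.length
  let used : PySem.Set String := PySem.Set.ofList fixed
  let t2o : PySem.Dict String (List String) :=
    ((PySem.Dict.ofList type_dict).items).foldl
      (fun m p => if used.contains p.1 then m else m.modify p.2 [] (fun l => l ++ [p.1]))
      PySem.Dict.empty
  -- type_to_objects[tp] raises KeyError when tp is absent: excluded by Pre_, so getD is exact there
  let choices := remaining.map (fun tp => t2o.getD tp [])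
  (pvProduct choices).foldl
    (fun acc combo =>
      let full := fixed ++ combo
      if PySem.Set.len (PySem.Set.ofList full) = (full.length : Int) then acc ++ [full] else acc)
    []

-- ===== PORT B =====
-- dfs(i, partial) of Source B: recursion over the remaining slot types, accumulator `part`
def pvDfs (pools : PySem.Dict String (List String)) (fixed : List String) :
    List String → List String → List (List String)
  | [], part => [fixed ++ part]
  | tp :: rest, part =>
      (pools.getD tp []).foldl
        (fun acc obj =>
          if part.contains obj then acc
          else acc ++ pvDfs pools fixed rest (part ++ [obj]))
        []

def generate_possible_groundings_alt (type_list : List String) (type_dict : List (String × String)) (fixed_grounding : Option (List String)) : List (List String) :=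
  let fixed := fixed_grounding.getD []
  -- (len(fixed) > len(type_list) raises ValueError: excluded by Pre_)
  if PySem.Set.len (PySem.Set.ofList fixed) ≠ (fixed.length : Int) then [] else
  let fixedSet : PySem.Set String := PySem.Set.ofList fixed
  let pools : PySem.Dict String (List String) :=
    ((PySem.Dict.ofList type_dict).items).foldl
      (fun m p => if fixedSet.contains p.1 then m else m.modify p.2 [] (fun l => l ++ [p.1]))
      PySem.Dict.empty
  pvDfs pools fixed (type_list.drop fixed.length) []

-- ===== PRECONDITION & SPEC =====
-- Pre_ excludes exactly the inputs on which Python A raises: ValueError when fixed_grounding is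
-- longer than type_list, and KeyError when some remaining slot type has no object of that type
-- outside fixed_grounding in the dict represented by type_dict.
def Pre_generate_possible_groundings (type_list : List String) (type_dict : List (String × String)) (fixed_grounding : Option (List String)) : Prop :=
  (fixed_grounding.getD []).length ≤ type_list.length ∧
  ∀ tp ∈ type_list.drop (fixed_grounding.getD []).length,
    ∃ p ∈ (PySem.Dict.ofList type_dict).items, p.2 = tp ∧ p.1 ∉ fixed_grounding.getD []
instance (type_list : List String) (type_dict : List (String × String)) (fixed_grounding : Option (List String)) : Decidable (Pre_generate_possible_groundings type_list type_dict fixed_grounding) := by unfold Pre_generate_possible_groundings; infer_instance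

def pvWitness_generate_possible_groundings : List String × (List (String × String)) × Option (List String) :=
  (["t", "t"], [("a", "t"), ("b", "t"), ("c", "u")], some ["c"])

def Spec_generate_possible_groundings (type_list : List String) (type_dict : List (String × String)) (fixed_grounding : Option (List String)) (out : List (List String)) : Prop := out = generate_possible_groundings_alt type_list type_dict fixed_grounding
instance (type_list : List String) (type_dict : List (String × String)) (fixed_grounding : Option (List String)) (out : List (List String)) : Decidable (Spec_generate_possible_groundings type_list type_dict fixed_grounding out) := by unfold Spec_generate_possible_groundings; infer_instance

-- ===== CLAIM (what is proved, stated in full; the proofs are below) =====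
def Claim_equal_generate_possible_groundings : Prop := ∀ (type_list : List String) (type_dict : List (String × String)) (fixed_grounding : Option (List String)), Dom_generate_possible_groundings type_list type_dict fixed_grounding → Pre_generate_possible_groundings type_list type_dict fixed_grounding → Spec_generate_possible_groundings type_list type_dict fixed_grounding (generate_possible_groundings type_list type_dict fixed_grounding)

-- ===== LEMMAS AND PROOFS =====

-- set(xs) is a sublist of xs
theorem pv_foldl_add_sublist {s : List String} (xs : List String) :
    ∃ t, (xs.foldl PySem.Set.add s) = s ++ t ∧ t.Sublist xs := by
  induction xs generalizing s with
  | nil => exact ⟨[], by simp, List.Sublist.refl []⟩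
  | cons a xs ih =>
    simp only [List.foldl_cons, PySem.Set.add]
    by_cases h : PySem.Set.contains s a = true
    · simp only [h, if_true]
      obtain ⟨t, ht, hs⟩ := ih (s := s)
      exact ⟨t, ht, hs.cons a⟩
    · simp only [h]
      obtain ⟨t, ht, hs⟩ := ih (s := s ++ [a])
      exact ⟨a :: t, by simpa using ht, hs.cons₂ a⟩

theorem pv_ofList_sublist (xs : List String) : (PySem.Set.ofList xs).Sublist xs := by
  obtain ⟨t, ht, hs⟩ := pv_foldl_add_sublist (s := []) xs
  simpa [PySem.Set.ofList, ht] using hs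

theorem pv_foldl_add_of_nodup {s : List String} (xs : List String)
    (hn : xs.Nodup) (hd : ∀ a ∈ xs, a ∉ s) : xs.foldl PySem.Set.add s = s ++ xs := by
  induction xs generalizing s with
  | nil => simp
  | cons a xs ih =>
    simp only [List.foldl_cons, PySem.Set.add, PySem.Set.contains]
    have ha : s.contains a = false := by
      simp only [List.contains_eq_mem, decide_eq_false_iff_not]
      exact hd a (by simp)
    simp only [ha, Bool.false_eq_true, if_false]
    have hd' : ∀ b ∈ xs, b ∉ s ++ [a] := by
      intro b hb
      simp only [List.mem_append, List.mem_singleton]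
      rintro (h | rfl)
      · exact hd b (by simp [hb]) h
      · exact (List.nodup_cons.mp hn).1 hb
    rw [ih (List.Nodup.of_cons hn) hd']
    simp

-- len(set(xs)) == len(xs) is exactly Nodup
theorem pv_set_len_iff (xs : List String) :
    (PySem.Set.len (PySem.Set.ofList xs) = (xs.length : Int)) ↔ xs.Nodup := by
  constructor
  · intro h
    have hlen : (PySem.Set.ofList xs).length = xs.length := by
      simpa only [PySem.Set.len, Int.natCast_inj] using h
    have heq := (pv_ofList_sublist xs).eq_of_length hlen
    exact heq ▸ PySem.Set.nodup_ofList xs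
  · intro h
    have heq : PySem.Set.ofList xs = xs := by
      simpa using pv_foldl_add_of_nodup (s := []) xs h (by simp)
    simp only [PySem.Set.len, heq]

-- a guarded foldl is a foldl over the filtered list
theorem pv_foldl_skip_filter {α β : Type} (c : α → Bool) (g : β → α → β) (l : List α) (init : β) :
    l.foldl (fun m p => if c p then m else g m p) init
      = (l.filter (fun p => !c p)).foldl g init := by
  induction l generalizing init with
  | nil => rfl
  | cons a t ih =>
    by_cases h : c a <;> simp [h, ih]

-- 'if cond: out.append(f(x))' over a list, with a Prop condition
theorem pv_foldl_append_ite {α β : Type} (P : α → Prop) [DecidablePred P] (f : α → β)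
    (l : List α) (acc : List β) :
    l.foldl (fun acc x => if P x then acc ++ [f x] else acc) acc
      = acc ++ (l.filter (fun x => decide (P x))).map f := by
  induction l generalizing acc with
  | nil => simp
  | cons a t ih =>
    by_cases h : P a <;> simp [h, ih]

-- the pool each type gets: the not-fixed objects of that type, in dict order
theorem pv_pool_getD (l : List (String × String)) (fixedSet : PySem.Set String) (tp : String) :
    ((l.foldl (fun m p => if fixedSet.contains p.1 then m else m.modify p.2 [] (fun ls => ls ++ [p.1]))
        (PySem.Dict.empty : PySem.Dict String (List String))).getD tp [])
      = (((l.filter (fun p => !fixedSet.contains p.1)).map Prod.swap).filter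
          (fun q => q.1 == tp)).map (fun q => q.2) := by
  rw [pv_foldl_skip_filter]
  have h := List.foldl_map (f := Prod.swap)
    (g := fun (m : PySem.Dict String (List String)) (q : String × String) =>
      m.modify q.1 [] (fun ls => ls ++ [q.2]))
    (l := l.filter (fun p => !fixedSet.contains p.1)) (init := PySem.Dict.empty)
  simp only [Prod.fst_swap, Prod.snd_swap] at h
  rw [← h, PySem.Dict.getD_foldl_modify_append]
  simp

theorem pv_pool_not_fixed (l : List (String × String)) (fixed : List String) (tp obj : String)
    (h : obj ∈ ((l.foldl (fun m p => if (PySem.Set.ofList fixed).contains p.1 then m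
          else m.modify p.2 [] (fun ls => ls ++ [p.1]))
        (PySem.Dict.empty : PySem.Dict String (List String))).getD tp [])) : obj ∉ fixed := by
  rw [pv_pool_getD] at h
  simp only [List.mem_map, List.mem_filter, List.mem_map] at h
  obtain ⟨q, ⟨⟨p, ⟨_, hp⟩, rfl⟩, _⟩, rfl⟩ := h
  simp only [Bool.not_eq_eq_eq_not, Bool.not_true, PySem.Set.contains,
    List.contains_eq_mem, decide_eq_false_iff_not, PySem.Set.mem_ofList] at hp
  simpa using hp

-- every element of a product member comes from one of the pools
theorem pv_mem_product {ls : List (List String)} {c : List String}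
    (hc : c ∈ pvProduct ls) : ∀ x ∈ c, ∃ l ∈ ls, x ∈ l := by
  induction ls generalizing c with
  | nil =>
    simp only [pvProduct, List.mem_singleton] at hc
    subst hc; simp
  | cons a ls ih =>
    simp only [pvProduct, List.mem_flatMap, List.mem_map] at hc
    obtain ⟨x, hx, c', hc', rfl⟩ := hc
    intro y hy
    rcases List.mem_cons.mp hy with rfl | hy
    · exact ⟨a, by simp, hx⟩
    · obtain ⟨l, hl, hyl⟩ := ih hc' y hy
      exact ⟨l, by simp [hl], hyl⟩

-- the DFS enumerates exactly the duplicate-free product extensions, in product order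
theorem pv_dfs_eq (pools : PySem.Dict String (List String)) (fixed : List String) :
    ∀ (rem : List String) (part : List String), part.Nodup →
    pvDfs pools fixed rem part
      = ((pvProduct (rem.map (fun tp => pools.getD tp []))).filter
          (fun c => decide ((part ++ c).Nodup))).map (fun c => fixed ++ (part ++ c)) := by
  intro rem
  induction rem with
  | nil =>
    intro part hp
    simp [pvDfs, pvProduct, hp]
  | cons tp rest ih =>
    intro part hp
    simp only [pvDfs]
    have hbody : (fun (acc : List (List String)) (obj : String) =>
        if part.contains obj then acc else acc ++ pvDfs pools fixed rest (part ++ [obj]))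
        = (fun acc obj => acc ++ (if part.contains obj then [] else pvDfs pools fixed rest (part ++ [obj]))) := by
      funext acc obj; by_cases h : obj ∈ part <;> simp [h]
    rw [hbody, PySem.List.foldl_append_eq_flatMap]
    simp only [List.nil_append, List.map_cons, pvProduct, List.filter_flatMap, List.map_flatMap]
    apply List.flatMap_congr
    intro obj _
    by_cases h : part.contains obj
    · have hmem : obj ∈ part := by simpa using h
      have hnil : ∀ c ∈ pvProduct (rest.map (fun tp => pools.getD tp [])),
          ¬ (part ++ obj :: c).Nodup := by
        intro c _ hn
        exact (List.disjoint_of_nodup_append hn) hmem (by simp)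
      simp only [h, if_true, List.filter_map, Function.comp_def]
      rw [List.filter_eq_nil_iff.mpr (by intro c hc; simpa using hnil c hc)]
      simp
    · have hmem : obj ∉ part := by simpa using h
      have hnd : (part ++ [obj]).Nodup := by
        rw [List.nodup_append]
        exact ⟨hp, List.nodup_singleton _, by intro a ha b hb hab; exact hmem (((List.mem_singleton.mp hb) ▸ hab) ▸ ha)⟩
      rw [if_neg h, ih (part ++ [obj]) hnd]
      simp [List.filter_map, Function.comp_def, List.append_assoc]

-- ===== VERDICT (by name: the statement is the Claim_ definition above) =====
theorem generate_possible_groundings_spec : Claim_equal_generate_possible_groundings := by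
  intro type_list type_dict fixed_grounding _ _
  unfold Spec_generate_possible_groundings
  unfold generate_possible_groundings generate_possible_groundings_alt
  set fixed := fixed_grounding.getD [] with hfixed
  by_cases hdup : fixed.Nodup
  · -- fixed has no duplicates: both sides enumerate the duplicate-free combinations in order
    rw [if_neg (not_not_intro ((pv_set_len_iff fixed).mpr hdup))]
    rw [pv_dfs_eq _ _ _ [] (by simp)]
    rw [pv_foldl_append_ite (P := fun combo => PySem.Set.len (PySem.Set.ofList (fixed ++ combo)) = ((fixed ++ combo).length : Int))]
    simp only [List.nil_append]
    rw [List.filter_congr (q := fun c => decide (([] : List String) ++ c).Nodup) ?_]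
    · simp
    · intro c hc
      have hnotfixed : ∀ x ∈ c, x ∉ fixed := by
        intro x hx
        obtain ⟨l, hl, hxl⟩ := pv_mem_product hc x hx
        obtain ⟨tp, _, rfl⟩ := List.mem_map.mp hl
        exact pv_pool_not_fixed _ _ _ _ hxl
      simp only [decide_eq_decide, pv_set_len_iff, List.nil_append]
      rw [List.nodup_append]
      constructor
      · rintro ⟨_, hc', _⟩; exact hc'
      · intro hc'
        exact ⟨hdup, hc', by intro a ha b hb hab; exact hnotfixed b hb (hab ▸ ha)⟩
  · -- fixed has duplicates: B returns [] up front, A's filter never fires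
    rw [if_pos (fun hc => hdup ((pv_set_len_iff fixed).mp hc))]
    rw [pv_foldl_append_ite (P := fun combo => PySem.Set.len (PySem.Set.ofList (fixed ++ combo)) = ((fixed ++ combo).length : Int))]
    rw [List.filter_eq_nil_iff.mpr ?_]
    · simp
    · intro c _
      simp only [decide_eq_true_eq, pv_set_len_iff]
      exact fun hn => hdup hn.of_append_left
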